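-- pv_equiv track=rewrite | github.com/NY-Chae/TestCode | 프로그래머스/1/133502. 햄버거 만들기/햄버거 만들기.py | solution
-- ===== SOURCE A (Python) =====
-- def solution(ingredient):
--     stack = []
--     yeon = 0
--     for i in ingredient:
--         stack.append(i)
--         if stack[-4:] == [1,2,3,1]:
--             yeon += 1
--             for _ in range(4):
--                 stack.pop()
--
--     return yeon
-- ===== SOURCE B (Python) =====
-- def solution(ingredient):
--     # B: repeated leftmost-match deletion on a working copy (does not mutate the argument),
--     # instead of A's single stack pass.
--     def find4(lst):
--         i = 0
--         while i + 4 <= len(lst):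
--             if lst[i] == 1 and lst[i + 1] == 2 and lst[i + 2] == 3 and lst[i + 3] == 1:
--                 return i
--             i += 1
--         return None
--
--     cur = list(ingredient)
--     count = 0
--     while True:
--         i = find4(cur)
--         if i is None:
--             return count
--         del cur[i:i + 4]
--         count += 1
-- ===== Notes on version B (the rewrite author's own statement) =====
-- stated objective: alternative
-- what changed: Replaces A's one-pass stack simulation (push each ingredient, pop 4 on a top match) by a rewriting process: repeatedly find the leftmost [1,2,3,1] window in a working copy, delete it and restart the scan, counting deletions.
import Mathlib
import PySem

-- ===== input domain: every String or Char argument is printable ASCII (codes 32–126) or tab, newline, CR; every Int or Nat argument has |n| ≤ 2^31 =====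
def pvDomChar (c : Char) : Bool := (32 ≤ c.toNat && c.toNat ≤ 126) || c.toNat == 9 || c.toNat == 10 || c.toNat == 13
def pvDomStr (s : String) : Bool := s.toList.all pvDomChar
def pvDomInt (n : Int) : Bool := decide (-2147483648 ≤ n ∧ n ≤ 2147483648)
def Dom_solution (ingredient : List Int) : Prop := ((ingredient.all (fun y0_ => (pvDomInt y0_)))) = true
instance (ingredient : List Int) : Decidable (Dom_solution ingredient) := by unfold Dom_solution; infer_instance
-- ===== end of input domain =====

-- B replaces A's one-pass stack simulation by repeated leftmost-window deletion on a working copy; alternative decomposition, not faster.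

-- ===== PORT A =====
-- for i in ingredient: stack.append(i); if stack[-4:] == [1,2,3,1]: yeon += 1; pop 4
def solution (ingredient : List Int) : Int :=
  (ingredient.foldl
    (fun (st : List Int × Int) i =>
      let stack := st.1 ++ [i]
      if PySem.List.slice stack (some (-4)) none = [1, 2, 3, 1] then
        -- yeon += 1; for _ in range(4): stack.pop()
        (stack.dropLast.dropLast.dropLast.dropLast, st.2 + 1)
      else (stack, st.2))
    ([], 0)).2

-- ===== PORT B =====
-- find4: left-to-right scan for the first index i whose 4-element window equals [1,2,3,1]
def find4 : List Int → Option Nat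
  | [] => none
  | a :: rest =>
    if a :: rest.take 3 = [1, 2, 3, 1] ∧ 3 ≤ rest.length then some 0
    else (find4 rest).map (· + 1)

theorem find4_some_le {l : List Int} {i : Nat} (h : find4 l = some i) : i + 4 ≤ l.length := by
  induction l generalizing i with
  | nil => simp [find4] at h
  | cons a rest ih =>
    rw [find4] at h
    split at h
    · rename_i hc
      cases h
      simpa using hc.2
    · cases hr : find4 rest with
      | none => rw [hr] at h; simp at h
      | some j =>
        rw [hr] at h
        simp at h
        have := ih hr
        simp [List.length_cons]
        omega

-- main loop of B: delete the leftmost [1,2,3,1] window, count, restart the scan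
def gloop (l : List Int) : Int :=
  match hfi : find4 l with
  | none => 0
  | some i => 1 + gloop (l.take i ++ l.drop (i + 4))
termination_by l.length
decreasing_by
  have := find4_some_le hfi
  simp [List.length_append, List.length_take, List.length_drop]
  omega

def solution_alt (ingredient : List Int) : Int := gloop ingredient

-- ===== PRECONDITION & SPEC =====
def Spec_solution (ingredient : List Int) (out : Int) : Prop := out = solution_alt ingredient
instance (ingredient : List Int) (out : Int) : Decidable (Spec_solution ingredient out) := by unfold Spec_solution; infer_instance

-- ===== CLAIM (what is proved, stated in full; the proofs are below) =====
def Claim_equal_solution : Prop := ∀ (ingredient : List Int), Dom_solution ingredient → Spec_solution ingredient (solution ingredient)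

-- ===== LEMMAS AND PROOFS =====

-- head-window test of find4 restated via take 4
theorem find4_cons_eq (a : Int) (rest : List Int) :
    find4 (a :: rest) =
      if (a :: rest).take 4 = [1,2,3,1] then some 0 else (find4 rest).map (· + 1) := by
  rw [find4]
  congr 1
  simp only [eq_iff_iff]
  constructor
  · rintro ⟨h1, h2⟩
    have ht : (a :: rest).take 4 = a :: rest.take 3 := by simp
    rw [ht, h1]
  · intro h
    have ht : (a :: rest).take 4 = a :: rest.take 3 := by simp
    rw [ht] at h
    refine ⟨h, ?_⟩
    have := congrArg List.length h
    simp at this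
    omega

theorem take4_append_pat {l : List Int} (t : List Int) (h : l.take 4 = [1,2,3,1]) :
    (l ++ t).take 4 = [1,2,3,1] := by
  have hlen : 4 ≤ l.length := by
    have := congrArg List.length h; simp at this; omega
  rw [List.take_append_of_le_length hlen, h]

-- find4 is none on a prefix if it is none on the whole
theorem find4_prefix_none {p t : List Int} (h : find4 (p ++ t) = none) : find4 p = none := by
  induction p with
  | nil => simp [find4]
  | cons a p' ih =>
    rw [List.cons_append, find4_cons_eq] at h
    split at h
    · exact absurd h (by simp)
    · rename_i hcf
      have hpt : find4 (p' ++ t) = none := by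
        cases hr : find4 (p' ++ t) with
        | none => rfl
        | some j => rw [hr] at h; simp at h
      rw [find4_cons_eq, if_neg, ih hpt]
      · rfl
      · intro hpat
        exact hcf (by simpa using take4_append_pat (l := a :: p') t hpat)

-- extension: no window in s and the new last window fails ⇒ no window in s ++ [x]
theorem find4_snoc_none {s : List Int} {x : Int}
    (hs : find4 s = none)
    (hC : ¬ (∃ p, s = p ++ [1,2,3] ∧ x = 1)) :
    find4 (s ++ [x]) = none := by
  induction s with
  | nil =>
    rw [List.nil_append, find4_cons_eq, if_neg (by simp)]
    simp [find4]
  | cons a s' ih =>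
    rw [find4_cons_eq] at hs
    split at hs
    · exact absurd hs (by simp)
    · rename_i hcf
      have hs' : find4 s' = none := by
        cases hr : find4 s' with
        | none => rfl
        | some j => rw [hr] at hs; simp at hs
      have hC' : ¬ (∃ p, s' = p ++ [1,2,3] ∧ x = 1) := by
        rintro ⟨p, rfl, rfl⟩
        exact hC ⟨a :: p, by simp, rfl⟩
      have hrec := ih hs' hC'
      rw [List.cons_append, find4_cons_eq, if_neg, hrec]
      · rfl
      · intro hpat
        rcases s' with _ | ⟨b, _ | ⟨c, _ | ⟨d, s''⟩⟩⟩
        · simp at hpat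
        · simp at hpat
        · simp at hpat
          exact hC ⟨[], by simp [hpat.1, hpat.2.1, hpat.2.2.1], hpat.2.2.2⟩
        · apply hcf
          have harr : (b :: c :: d :: s'') ++ [x] = b :: c :: d :: (s'' ++ [x]) := by simp
          rw [harr] at hpat
          simp at hpat ⊢
          exact hpat

-- localisation: if p ++ [1,2,3] has no window, the leftmost window of (p ++ [1,2,3,1]) ++ q is at p.length
theorem find4_loc {p : List Int} (q : List Int)
    (h : find4 (p ++ [1,2,3]) = none) :
    find4 ((p ++ [1,2,3,1]) ++ q) = some p.length := by
  induction p with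
  | nil =>
    have h0 : find4 ([1,2,3,1] ++ q) = find4 (1 :: ([2,3,1] ++ q)) := rfl
    rw [List.nil_append, h0, find4_cons_eq, if_pos (by simp)]
    simp
  | cons a p' ih =>
    rw [List.cons_append, find4_cons_eq] at h
    split at h
    · exact absurd h (by simp)
    · rename_i hcf
      have h' : find4 (p' ++ [1,2,3]) = none := by
        cases hr : find4 (p' ++ [1,2,3]) with
        | none => rfl
        | some j => rw [hr] at h; simp at h
      have hrec := ih h'
      have harr : ((a :: p') ++ [1,2,3,1]) ++ q = a :: ((p' ++ [1,2,3,1]) ++ q) := by simp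
      have hnot : ¬ (a :: ((p' ++ [1,2,3,1]) ++ q)).take 4 = [1,2,3,1] := by
        intro hpat
        apply hcf
        have hsplit : a :: ((p' ++ [1,2,3,1]) ++ q) = (a :: (p' ++ [1,2,3])) ++ (1 :: q) := by simp
        rw [hsplit, List.take_append_of_le_length (by simp)] at hpat
        exact hpat
      rw [harr, find4_cons_eq, if_neg hnot, hrec]
      simp

-- unfolding equation for gloop
theorem gloop_eq (l : List Int) :
    gloop l = match find4 l with
      | none => 0
      | some i => 1 + gloop (l.take i ++ l.drop (i + 4)) := by
  rw [gloop.eq_def]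
  split
  · rename_i h; rw [h]
  · rename_i i h; rw [h]

-- the step function of A's loop
def stepA (st : List Int × Int) (i : Int) : List Int × Int :=
  let stack := st.1 ++ [i]
  if PySem.List.slice stack (some (-4)) none = [1, 2, 3, 1] then
    (stack.dropLast.dropLast.dropLast.dropLast, st.2 + 1)
  else (stack, st.2)

theorem solution_eq_foldl (ingredient : List Int) :
    solution ingredient = (ingredient.foldl stepA ([], 0)).2 := rfl

-- characterisation of A's pop condition stack[-4:] == [1,2,3,1]
theorem cond_iff {s : List Int} {x : Int} :
    PySem.List.slice (s ++ [x]) (some (-4)) none = [1,2,3,1] ↔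
      ∃ p, s = p ++ [1,2,3] ∧ x = 1 := by
  rw [PySem.List.slice_from_neg_ofNat (s ++ [x]) 4 (by omega)]
  constructor
  · intro h
    have hlen1 : (s ++ [x]).length = s.length + 1 := by simp
    by_cases h3 : 3 ≤ s.length
    · have hidx : (s ++ [x]).length - 4 = s.length - 3 := by omega
      have hdrop : (s ++ [x]).drop ((s ++ [x]).length - 4) = s.drop (s.length - 3) ++ [x] := by
        rw [hidx, List.drop_append_of_le_length (by omega)]
      rw [hdrop, show ([1,2,3,1] : List Int) = [1,2,3] ++ [1] from rfl] at h
      obtain ⟨h123, hx1⟩ := List.append_inj' h (by simp)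
      refine ⟨s.take (s.length - 3), ?_, by simpa using hx1⟩
      conv_lhs => rw [← List.take_append_drop (s.length - 3) s, h123]
    · exfalso
      have hlen := congrArg List.length h
      rw [List.length_drop] at hlen
      simp at hlen
      omega
  · rintro ⟨p, rfl, rfl⟩
    rw [show (p ++ [(1:Int),2,3]) ++ [(1:Int)] = (p ++ [1,2,3,1]) from by simp]
    rw [show (p ++ [(1:Int),2,3,1]).length - 4 = p.length from by simp]
    rw [List.drop_append_of_le_length (by simp)]
    simp

-- the four pops on p ++ [1,2,3,1] leave p
theorem pops_eq (p : List Int) :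
    ((p ++ [(1:Int),2,3,1]).dropLast.dropLast.dropLast.dropLast) = p := by
  simp

-- MAIN INVARIANT: running A's loop from a window-free stack s counts gloop (s ++ xs)
theorem loop_eq (xs : List Int) : ∀ (s : List Int) (c : Int), find4 s = none →
    (xs.foldl stepA (s, c)).2 = c + gloop (s ++ xs) := by
  induction xs with
  | nil =>
    intro s c hs
    rw [List.foldl_nil, List.append_nil, gloop_eq, hs]
    simp
  | cons x xs ih =>
    intro s c hs
    rw [List.foldl_cons]
    by_cases hC : ∃ p, s = p ++ [1,2,3] ∧ x = 1
    · obtain ⟨p, rfl, rfl⟩ := hC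
      have hcond : PySem.List.slice ((p ++ [1,2,3]) ++ [(1:Int)]) (some (-4)) none = [1,2,3,1] :=
        cond_iff.mpr ⟨p, rfl, rfl⟩
      have hstep : stepA (p ++ [1,2,3], c) 1 = (p, c + 1) := by
        simp only [stepA]
        rw [if_pos hcond,
            show (p ++ [(1:Int),2,3]) ++ [(1:Int)] = p ++ [1,2,3,1] from by simp, pops_eq]
      rw [hstep]
      have hp : find4 p = none := find4_prefix_none hs
      rw [ih p (c + 1) hp]
      have harr : (p ++ [1,2,3]) ++ 1 :: xs = (p ++ [(1:Int),2,3,1]) ++ xs := by simp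
      have h1 : ((p ++ [(1:Int),2,3,1]) ++ xs).take p.length = p := by
        rw [List.take_append_of_le_length (by simp), List.take_append_of_le_length le_rfl]
        simp
      have h2 : ((p ++ [(1:Int),2,3,1]) ++ xs).drop (p.length + 4) = xs := by
        rw [List.drop_append_of_le_length (by simp)]
        rw [show (p ++ [(1:Int),2,3,1]).drop (p.length + 4) = [] from
              List.drop_eq_nil_of_le (by simp)]
        simp
      rw [harr, gloop_eq ((p ++ [1,2,3,1]) ++ xs), find4_loc xs hs]
      simp only [h1, h2]
      ring
    · have hcond : ¬ PySem.List.slice (s ++ [x]) (some (-4)) none = [1,2,3,1] := by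
        rw [cond_iff]; exact hC
      have hstep : stepA (s, c) x = (s ++ [x], c) := by
        simp only [stepA]
        rw [if_neg hcond]
      rw [hstep]
      have hsx : find4 (s ++ [x]) = none := find4_snoc_none hs hC
      rw [ih (s ++ [x]) c hsx, List.append_assoc]
      rfl

-- ===== VERDICT (by name: the statement is the Claim_ definition above) =====
theorem solution_spec : Claim_equal_solution := by
  intro ingredient _
  unfold Spec_solution solution_alt
  rw [solution_eq_foldl, loop_eq ingredient [] 0 (by rfl)]
  simp
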